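-- pv_equiv track=rewrite | github.com/hirorion/dashcamvideoanalysis | app_ai/worker/detections.py | check_object_not_appear
-- ===== SOURCE A (Python) =====
-- def check_object_not_appear(check_arr, sfno, efno):
--     """
--     指定フレーム間で指定された配列にオブジェクトが0回だったらを見つける
--     :param check_arr:
--     :param sfno:
--     :param efno:
--     :return: 見つけた: fno/ 見つけられない: -1
--     """
--     end_check_flag = 0
--     for fno in range(sfno, efno):
--         if fno in check_arr:
--             end_check_flag = end_check_flag + 1
--
--     if end_check_flag == 0:
--         # 出口見つけた
--         # 次のチェックポイントを見つけさせる
--         return efno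
--     return -1
-- ===== SOURCE B (Python) =====
-- def check_object_not_appear(check_arr, sfno, efno):
--     for x in check_arr:
--         if sfno <= x < efno:
--             return -1
--     return efno
-- ===== Notes on version B (the rewrite author's own statement) =====
-- stated objective: alternative
-- what changed: B scans check_arr once with an early-exit bound test instead of A's pass over range(sfno, efno) with a membership test per frame and a counter.
import Mathlib
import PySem

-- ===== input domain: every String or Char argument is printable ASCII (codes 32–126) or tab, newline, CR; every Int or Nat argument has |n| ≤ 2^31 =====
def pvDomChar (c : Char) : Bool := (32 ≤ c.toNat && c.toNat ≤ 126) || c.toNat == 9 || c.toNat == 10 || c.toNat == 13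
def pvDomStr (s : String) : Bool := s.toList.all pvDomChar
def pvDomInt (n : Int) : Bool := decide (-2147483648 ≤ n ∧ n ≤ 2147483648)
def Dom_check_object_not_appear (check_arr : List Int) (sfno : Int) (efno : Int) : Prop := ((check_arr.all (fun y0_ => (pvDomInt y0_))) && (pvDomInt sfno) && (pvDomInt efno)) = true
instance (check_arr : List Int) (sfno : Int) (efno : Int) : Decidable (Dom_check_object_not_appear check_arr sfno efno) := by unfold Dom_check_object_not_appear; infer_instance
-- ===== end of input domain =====

-- B scans check_arr once with an early-exit bound test instead of A's pass over the frame range with per-frame membership and a counter (alternative decomposition).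


-- ===== PORT A =====
-- literal port: count frames of range(sfno, efno) that occur in check_arr, return efno iff the count is 0
def check_object_not_appear (check_arr : List Int) (sfno : Int) (efno : Int) : Int :=
  let end_check_flag :=
    (PySem.List.pyRange sfno efno 1).foldl
      (fun acc fno => if fno ∈ check_arr then acc + 1 else acc) (0 : Int)
  if end_check_flag = 0 then efno else -1

-- ===== PORT B =====
-- literal port of Source B: early-exit scan over check_arr with a bound test
def check_object_not_appear_alt (check_arr : List Int) (sfno : Int) (efno : Int) : Int :=
  match check_arr with
  | [] => efno
  | x :: rest => if sfno ≤ x ∧ x < efno then -1 else check_object_not_appear_alt rest sfno efno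

-- ===== PRECONDITION & SPEC =====
def Spec_check_object_not_appear (check_arr : List Int) (sfno : Int) (efno : Int) (out : Int) : Prop := out = check_object_not_appear_alt check_arr sfno efno
instance (check_arr : List Int) (sfno : Int) (efno : Int) (out : Int) : Decidable (Spec_check_object_not_appear check_arr sfno efno out) := by unfold Spec_check_object_not_appear; infer_instance

-- ===== CLAIM (what is proved, stated in full; the proofs are below) =====
def Claim_equal_check_object_not_appear : Prop := ∀ (check_arr : List Int) (sfno : Int) (efno : Int), Dom_check_object_not_appear check_arr sfno efno → Spec_check_object_not_appear check_arr sfno efno (check_object_not_appear check_arr sfno efno)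

-- ===== LEMMAS AND PROOFS =====

-- A's counter fold equals init plus a countP
theorem flag_eq_countP (check_arr l : List Int) (init : Int) :
    l.foldl (fun acc fno => if fno ∈ check_arr then acc + 1 else acc) init
      = init + (l.countP (fun fno => decide (fno ∈ check_arr)) : Int) := by
  induction l generalizing init with
  | nil => simp
  | cons x xs ih =>
      simp only [List.foldl_cons, List.countP_cons, ih]
      by_cases h : x ∈ check_arr <;> simp [h] <;> push_cast <;> try ring

theorem alt_eq_neg_one (check_arr : List Int) (sfno efno : Int)
    (h : ∃ x ∈ check_arr, sfno ≤ x ∧ x < efno) :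
    check_object_not_appear_alt check_arr sfno efno = -1 := by
  induction check_arr with
  | nil => simp at h
  | cons x xs ih =>
      by_cases hx : sfno ≤ x ∧ x < efno
      · simp [check_object_not_appear_alt, hx]
      · rcases h with ⟨y, hy, hb⟩
        rcases List.mem_cons.mp hy with hy | hy
        · exact absurd (hy ▸ hb) hx
        · simp [check_object_not_appear_alt, hx, ih ⟨y, hy, hb⟩]

theorem alt_eq_efno (check_arr : List Int) (sfno efno : Int)
    (h : ∀ x ∈ check_arr, ¬ (sfno ≤ x ∧ x < efno)) :
    check_object_not_appear_alt check_arr sfno efno = efno := by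
  induction check_arr with
  | nil => rfl
  | cons x xs ih =>
      have hx := h x (by simp)
      simp [check_object_not_appear_alt, hx,
        ih (fun y hy => h y (List.mem_cons_of_mem _ hy))]

-- ===== VERDICT (by name: the statement is the Claim_ definition above) =====
theorem check_object_not_appear_spec : Claim_equal_check_object_not_appear := by
  intro check_arr sfno efno _
  unfold Spec_check_object_not_appear check_object_not_appear
  simp only [flag_eq_countP, Int.zero_add]
  by_cases h : ∃ x ∈ check_arr, sfno ≤ x ∧ x < efno
  · rcases h with ⟨x, hx, hb⟩
    have hc : 0 < (PySem.List.pyRange sfno efno 1).countP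
        (fun fno => decide (fno ∈ check_arr)) := by
      refine List.countP_pos_iff.mpr ⟨x, ?_, by simp [hx]⟩
      exact (PySem.List.mem_pyRange_one).mpr hb
    rw [alt_eq_neg_one check_arr sfno efno ⟨x, hx, hb⟩, if_neg (by omega)]
  · push Not at h
    have hc : (PySem.List.pyRange sfno efno 1).countP
        (fun fno => decide (fno ∈ check_arr)) = 0 := by
      refine List.countP_eq_zero.mpr ?_
      intro fno hf
      have := (PySem.List.mem_pyRange_one).mp hf
      simp only [decide_eq_true_eq]
      intro hmem
      exact absurd this (by simpa using h fno hmem)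
    rw [alt_eq_efno check_arr sfno efno (by intro x hx hb; exact absurd hb.2 (by simpa using (h x hx) hb.1))]
    simp [hc]
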